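-- pv_equiv track=rewrite | github.com/Mayank2112/dsa_learning | patterns/pattern12.py | prepareRowData
-- ===== SOURCE A (Python) =====
-- def prepareRowData(rowNo, totalRows):
--   val = ""
--   for counter in range(1, rowNo + 1):
--     val += str(counter)
--   val += " " * (totalRows - rowNo) * 2
--   for counter in range(rowNo, 0, -1):
--     val += str(counter)
--   return val
-- ===== SOURCE B (Python) =====
-- def prepareRowData(rowNo, totalRows):
--     # Divide and conquer: halves(lo, hi) returns BOTH the ascending and the
--     # descending digit string for the numbers lo..hi-1 at once, built by
--     # splitting the range in half and combining the sub-results (the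
--     # descending half combines the two pieces in swapped order).
--     def halves(lo, hi):
--         if hi - lo <= 0:
--             return "", ""
--         if hi - lo == 1:
--             s = str(lo)
--             return s, s
--         m = (lo + hi) // 2
--         a1, d1 = halves(lo, m)
--         a2, d2 = halves(m, hi)
--         return a1 + a2, d2 + d1
--     asc, desc = halves(1, rowNo + 1)
--     return asc + " " * (totalRows - rowNo) * 2 + desc
-- ===== Notes on version B (the rewrite author's own statement) =====
-- stated objective: alternative
-- what changed: B replaces A's two sequential accumulation loops by a recursive divide-and-conquer helper that splits the number range in half and returns BOTH the ascending and the descending digit string of a range at once (combining sub-results in swapped order for the descending half).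
import Mathlib
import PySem

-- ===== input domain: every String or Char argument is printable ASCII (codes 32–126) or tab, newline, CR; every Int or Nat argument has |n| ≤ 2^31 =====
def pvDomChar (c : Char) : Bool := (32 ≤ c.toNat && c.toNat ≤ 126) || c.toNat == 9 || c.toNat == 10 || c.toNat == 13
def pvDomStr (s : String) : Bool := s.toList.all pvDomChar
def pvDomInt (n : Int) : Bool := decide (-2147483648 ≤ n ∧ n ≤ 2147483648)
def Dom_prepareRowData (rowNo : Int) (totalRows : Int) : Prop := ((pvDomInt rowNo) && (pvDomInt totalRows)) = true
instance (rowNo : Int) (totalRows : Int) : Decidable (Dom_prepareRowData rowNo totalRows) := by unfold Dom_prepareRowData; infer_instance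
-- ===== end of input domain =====

-- B replaces A's two accumulation loops by a divide-and-conquer helper that splits the number
-- range in half and returns both the ascending and the descending digit string at once;
-- objective: alternative decomposition.

-- ===== PORT A =====
def prepareRowData (rowNo : Int) (totalRows : Int) : String :=
  let val : String := ""
  let val := (PySem.List.pyRange 1 (rowNo + 1) 1).foldl
    (fun acc counter => acc ++ PySem.Int.toStr counter) val
  -- val += " " * (totalRows - rowNo) * 2  (left-assoc: repeat by (totalRows-rowNo), then by 2)
  let val := val ++ String.ofList (PySem.List.pyRepeat
    (String.ofList (PySem.List.pyRepeat " ".toList (totalRows - rowNo))).toList 2)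
  (PySem.List.pyRange rowNo 0 (-1)).foldl
    (fun acc counter => acc ++ PySem.Int.toStr counter) val

-- ===== PORT B =====
-- halves(lo, hi): the (ascending, descending) digit strings of the numbers lo..hi-1,
-- by splitting the range at the midpoint (descending combines the pieces swapped)
def pvHalves (lo : Int) (hi : Int) : String × String :=
  if h0 : hi - lo ≤ 0 then ("", "")
  else if h1 : hi - lo = 1 then
    let s := PySem.Int.toStr lo
    (s, s)
  else
    let m := PySem.Int.floordiv (lo + hi) 2
    let p1 := pvHalves lo m
    let p2 := pvHalves m hi
    (p1.1 ++ p2.1, p2.2 ++ p1.2)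
termination_by (hi - lo).toNat
decreasing_by
  · have hb := PySem.Int.floordiv_two_mid_bounds (lo := lo) (hi := hi) (by omega)
    have he : PySem.Int.floordiv (lo + hi) 2 = (lo + hi) / 2 :=
      PySem.Int.floordiv_eq_ediv_of_pos (by omega)
    omega
  · have hb := PySem.Int.floordiv_two_mid_bounds (lo := lo) (hi := hi) (by omega)
    have he : PySem.Int.floordiv (lo + hi) 2 = (lo + hi) / 2 :=
      PySem.Int.floordiv_eq_ediv_of_pos (by omega)
    omega

def prepareRowData_alt (rowNo : Int) (totalRows : Int) : String :=
  let p := pvHalves 1 (rowNo + 1)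
  p.1 ++ String.ofList (PySem.List.pyRepeat
    (String.ofList (PySem.List.pyRepeat " ".toList (totalRows - rowNo))).toList 2) ++ p.2

-- ===== PRECONDITION & SPEC =====
def Spec_prepareRowData (rowNo : Int) (totalRows : Int) (out : String) : Prop := out = prepareRowData_alt rowNo totalRows
instance (rowNo : Int) (totalRows : Int) (out : String) : Decidable (Spec_prepareRowData rowNo totalRows out) := by unfold Spec_prepareRowData; infer_instance

-- ===== CLAIM (what is proved, stated in full; the proofs are below) =====
def Claim_equal_prepareRowData : Prop := ∀ (rowNo : Int) (totalRows : Int), Dom_prepareRowData rowNo totalRows → Spec_prepareRowData rowNo totalRows (prepareRowData rowNo totalRows)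

-- ===== LEMMAS AND PROOFS =====

-- "".join on a cons splits off the head
theorem pv_join_empty_cons (p : String) (ps : List String) :
    PySem.Str.join "" (p :: ps) = p ++ PySem.Str.join "" ps := by
  unfold PySem.Str.join PySem.Chars.join
  cases ps with
  | nil => simp [List.intercalate]
  | cons q qs =>
    simp only [List.map_cons, List.intercalate, List.intersperse]
    apply String.ext
    simp

-- "".join distributes over list append
theorem pv_join_empty_append (xs ys : List String) :
    PySem.Str.join "" (xs ++ ys) = PySem.Str.join "" xs ++ PySem.Str.join "" ys := by
  induction xs with
  | nil =>
    simp only [List.nil_append]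
    apply String.ext
    simp [PySem.Str.join, PySem.Chars.join, List.intercalate]
  | cons a t ih =>
    simp only [List.cons_append, pv_join_empty_cons, ih, String.append_assoc]

-- A's accumulation loop equals "" joined over the mapped list
theorem pv_foldl_toStr (l : List Int) (s : String) :
    l.foldl (fun acc c => acc ++ PySem.Int.toStr c) s
      = s ++ PySem.Str.join "" (l.map PySem.Int.toStr) := by
  induction l generalizing s with
  | nil => simp [PySem.Str.join, PySem.Chars.join, List.intercalate]
  | cons a t ih =>
    simp only [List.foldl_cons, List.map_cons, pv_join_empty_cons]
    rw [ih, String.append_assoc]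

-- B's divide-and-conquer helper computes the joined ascending and descending halves
theorem pvHalves_eq (lo : Int) (hi : Int) :
    pvHalves lo hi
      = (PySem.Str.join "" ((PySem.List.pyRange lo hi 1).map PySem.Int.toStr),
         PySem.Str.join "" ((PySem.List.pyRange lo hi 1).reverse.map PySem.Int.toStr)) := by
  induction lo, hi using pvHalves.induct with
  | case1 lo hi h0 =>
    rw [pvHalves, dif_pos h0, PySem.List.pyRange_one_eq_nil (by omega)]
    apply Prod.ext <;> apply String.ext <;>
      simp [PySem.Str.join, PySem.Chars.join, List.intercalate]
  | case2 lo hi h0 h1 =>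
    rw [pvHalves, dif_neg h0, dif_pos h1]
    have : hi = lo + 1 := by omega
    subst this
    rw [PySem.List.pyRange_one_singleton]
    apply Prod.ext <;> apply String.ext <;>
      simp [PySem.Str.join, PySem.Chars.join, List.intercalate]
  | case3 lo hi h0 h1 m ihA ihB =>
    rw [pvHalves, dif_neg h0, dif_neg h1]
    have hb := PySem.Int.floordiv_two_mid_bounds (lo := lo) (hi := hi) (by omega)
    rw [PySem.List.pyRange_one_append lo (PySem.Int.floordiv (lo + hi) 2) hi hb.1 hb.2]
    have hm : m = PySem.Int.floordiv (lo + hi) 2 := rfl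
    rw [hm] at ihA ihB
    simp only [ihA, ihB, List.map_append, List.reverse_append, pv_join_empty_append]

-- ===== VERDICT (by name: the statement is the Claim_ definition above) =====
theorem prepareRowData_spec : Claim_equal_prepareRowData := by
  intro rowNo totalRows _
  show prepareRowData rowNo totalRows = prepareRowData_alt rowNo totalRows
  unfold prepareRowData prepareRowData_alt
  rw [pvHalves_eq, PySem.List.pyRange_neg_one_eq_reverse]
  simp only [zero_add]
  rw [pv_foldl_toStr, pv_foldl_toStr]
  apply String.ext
  simp
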